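-- pv_equiv track=rewrite | github.com/antmicro/kenning | kenning/cli/cli.py | get_all_sequences
-- ===== SOURCE A (Python) =====
-- from typing import List, Dict, Generator, Tuple, Optional
--
-- def get_all_sequences(
--     sequence: List[List[str]],
--     prefix: Optional[List[str]] = None,
-- ) -> Generator[Tuple[str], None, None]:
--     """
--     Yields possible sequences of commands.
--
--     Parameters
--     ----------
--     sequence : List[List[str]]
--         Sequence with commands in right order
--     prefix : Optional[List[str]]
--         Prefix appended to the results
--
--     Yields
--     ------
--     List[str] :
--         Sequence of commands
--     """
--     if prefix is None:
--         prefix = []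
--     if not sequence:
--         for i in range(len(prefix)):
--             yield tuple(prefix[i:])
--         return
--     for item in (
--         sequence[0] if isinstance(sequence[0], List) else [sequence[0]]
--     ):
--         yield from get_all_sequences(sequence[1:], prefix + [item])
-- ===== SOURCE B (Python) =====
-- from itertools import product
-- from typing import List, Optional
--
--
-- def get_all_sequences(
--     sequence: List[List[str]],
--     prefix: Optional[List[str]] = None,
-- ):
--     base = [] if prefix is None else list(prefix)
--     choices = [s if isinstance(s, List) else [s] for s in sequence]
--     for combo in product(*choices):
--         full = base + list(combo)
--         for i in range(len(full)):
--             yield tuple(full[i:])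
-- ===== Notes on version B (the rewrite author's own statement) =====
-- stated objective: idiomatic
-- what changed: Replaced A's recursive generator (recursing on the tail with a growing prefix) by an iterative itertools.product enumeration of the per-position choice lists, appending each combination to the prefix and emitting its suffixes.
import Mathlib
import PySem

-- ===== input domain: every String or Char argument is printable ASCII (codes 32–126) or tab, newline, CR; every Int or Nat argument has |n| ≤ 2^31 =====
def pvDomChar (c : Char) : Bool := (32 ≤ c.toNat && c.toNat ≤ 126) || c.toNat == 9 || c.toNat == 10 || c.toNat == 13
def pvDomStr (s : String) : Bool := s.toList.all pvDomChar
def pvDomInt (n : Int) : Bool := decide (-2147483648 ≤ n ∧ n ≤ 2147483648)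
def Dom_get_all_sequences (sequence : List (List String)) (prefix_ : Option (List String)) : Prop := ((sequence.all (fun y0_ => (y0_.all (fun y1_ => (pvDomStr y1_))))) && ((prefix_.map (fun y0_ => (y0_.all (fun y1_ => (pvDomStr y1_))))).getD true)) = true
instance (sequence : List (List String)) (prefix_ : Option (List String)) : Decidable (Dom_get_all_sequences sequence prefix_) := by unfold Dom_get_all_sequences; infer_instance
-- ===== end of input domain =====

-- B replaces A's recursive generator by an itertools.product-style iteration over precomputed
-- per-position choice lists, emitting the suffixes of each full combination (idiomatic).


-- ===== PORT A =====
-- A's recursion; the 'isinstance(sequence[0], List)' test is always true here since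
-- each element of sequence : List (List String) is a list, so the then-branch is taken.
def getAllSeqA (sequence : List (List String)) (pfx : List String) : List (List String) :=
  match sequence with
  | [] => (List.range pfx.length).map (fun i => PySem.List.slice pfx (some (i : Int)) none)
  | s0 :: rest => s0.flatMap (fun item => getAllSeqA rest (pfx ++ [item]))

def get_all_sequences (sequence : List (List String)) (prefix_ : Option (List String)) : List (List String) :=
  getAllSeqA sequence (match prefix_ with | none => [] | some p => p)

-- ===== PORT B =====
-- itertools.product over the choice lists (leftmost varies slowest)
def pyProduct (choices : List (List String)) : List (List String) :=
  choices.foldr (fun c acc => c.flatMap (fun x => acc.map (fun t => x :: t))) [[]]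

-- the inner loop: tuple(full[i:]) for i in range(len(full))
def suffixesB (full : List String) : List (List String) :=
  (List.range full.length).map (fun i => PySem.List.slice full (some (i : Int)) none)

def get_all_sequences_alt (sequence : List (List String)) (prefix_ : Option (List String)) : List (List String) :=
  let base := match prefix_ with | none => [] | some p => p
  (pyProduct sequence).flatMap (fun combo => suffixesB (base ++ combo))

-- ===== PRECONDITION & SPEC =====
def Spec_get_all_sequences (sequence : List (List String)) (prefix_ : Option (List String)) (out : List (List String)) : Prop := out = get_all_sequences_alt sequence prefix_
instance (sequence : List (List String)) (prefix_ : Option (List String)) (out : List (List String)) : Decidable (Spec_get_all_sequences sequence prefix_ out) := by unfold Spec_get_all_sequences; infer_instance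

-- ===== CLAIM (what is proved, stated in full; the proofs are below) =====
def Claim_equal_get_all_sequences : Prop := ∀ (sequence : List (List String)) (prefix_ : Option (List String)), Dom_get_all_sequences sequence prefix_ → Spec_get_all_sequences sequence prefix_ (get_all_sequences sequence prefix_)

-- ===== LEMMAS AND PROOFS =====
theorem getAllSeqA_eq_product (sequence : List (List String)) :
    ∀ pfx, getAllSeqA sequence pfx
      = (pyProduct sequence).flatMap (fun combo => suffixesB (pfx ++ combo)) := by
  induction sequence with
  | nil =>
      intro pfx
      simp [getAllSeqA, pyProduct, suffixesB]
  | cons s0 rest ih =>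
      intro pfx
      show s0.flatMap (fun item => getAllSeqA rest (pfx ++ [item])) = _
      simp only [pyProduct, List.foldr_cons]
      rw [List.flatMap_assoc]
      refine List.flatMap_congr (fun x _ => ?_)
      rw [ih (pfx ++ [x]), List.flatMap_map]
      simp [pyProduct]

-- ===== VERDICT (by name: the statement is the Claim_ definition above) =====
theorem get_all_sequences_spec : Claim_equal_get_all_sequences := by
  intro sequence prefix_ _
  unfold Spec_get_all_sequences get_all_sequences get_all_sequences_alt
  exact getAllSeqA_eq_product sequence _
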